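-- pv_equiv track=rewrite | github.com/Vik-s-Adventures/ViksModelAPI | notebook/app.py | transformar_output
-- ===== SOURCE A (Python) =====
-- EQUIVALENCIA = {
--     1: [8],  2: [10], 3: [3], 4: [6], 5: [7], 6: [6],
--     7: [7], 8: [8], 9: [9], 10: [5], 11: [2], 12: [1, 4]
-- }
--
-- def transformar_output(ruta_dict):
--     ruta_1a12 = [x + 1 for x in ruta_dict]  # Convertir índices de 0-11 a 1-12
--     ruta_preliminar = [EQUIVALENCIA[i] for i in ruta_1a12]
--
--     ruta_final = []
--     for item in ruta_preliminar:
--         for elem in item: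
--             if elem in ruta_final:
--                 ruta_final.remove(elem)
--             ruta_final.append(elem)
--
--     return ruta_final
-- ===== SOURCE B (Python) =====
-- EQUIVALENCIA = {
--     1: [8],  2: [10], 3: [3], 4: [6], 5: [7], 6: [6],
--     7: [7], 8: [8], 9: [9], 10: [5], 11: [2], 12: [1, 4]
-- }
--
-- def transformar_output(ruta_dict):
--     # Flatten the mapped equivalences into one stream and keep each element
--     # exactly at its LAST occurrence: an element survives iff it does not
--     # occur again later in the stream.
--     flat = [e for x in ruta_dict for e in EQUIVALENCIA[x + 1]]
--     return [e for i, e in enumerate(flat) if e not in flat[i + 1:]]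
-- ===== Notes on version B (the rewrite author's own statement) =====
-- stated objective: simpler
-- what changed: Replaces the move-to-end mutation loop (membership test + remove + append on the growing result) by flattening the mapped lists into one stream and filtering it: an element is kept exactly where it has no later occurrence, which yields the last-occurrence order directly.
import Mathlib
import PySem

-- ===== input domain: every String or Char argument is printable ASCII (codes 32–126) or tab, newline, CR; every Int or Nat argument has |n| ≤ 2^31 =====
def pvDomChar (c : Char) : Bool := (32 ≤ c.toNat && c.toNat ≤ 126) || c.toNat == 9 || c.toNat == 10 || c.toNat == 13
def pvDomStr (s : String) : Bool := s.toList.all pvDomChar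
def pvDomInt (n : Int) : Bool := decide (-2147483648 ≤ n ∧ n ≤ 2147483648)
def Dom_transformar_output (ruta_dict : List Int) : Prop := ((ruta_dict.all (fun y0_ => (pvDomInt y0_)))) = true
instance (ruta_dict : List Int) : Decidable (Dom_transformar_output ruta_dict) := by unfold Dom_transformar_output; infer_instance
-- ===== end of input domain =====

-- B replaces A's move-to-end mutation loop by filtering the flattened stream,
-- keeping an element exactly where it has no later occurrence; objective: simpler.

-- ===== PORT A =====
def pvEquiv : PySem.Dict Int (List Int) :=
  PySem.Dict.ofList [(1,[8]),(2,[10]),(3,[3]),(4,[6]),(5,[7]),(6,[6]),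
                     (7,[7]),(8,[8]),(9,[9]),(10,[5]),(11,[2]),(12,[1,4])]

-- inner loop body of A: 'if elem in ruta_final: ruta_final.remove(elem); ruta_final.append(elem)'
def pvStepA (acc : List Int) (elem : Int) : List Int :=
  if elem ∈ acc then ((PySem.List.remove? acc elem).getD acc) ++ [elem]
  else acc ++ [elem]

def transformar_output (ruta_dict : List Int) : List Int :=
  let ruta_1a12 := ruta_dict.map (fun x => x + 1)
  -- EQUIVALENCIA[i] raises KeyError outside keys 1..12: excluded by Pre_ below
  let ruta_preliminar := ruta_1a12.map (fun i => (PySem.Dict.get? pvEquiv i).getD [])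
  ruta_preliminar.foldl (fun acc item => item.foldl pvStepA acc) []

-- ===== PORT B =====
-- B's comprehension '[e for i, e in enumerate(flat) if e not in flat[i+1:]]':
-- at position i the remaining slice flat[i+1:] is exactly the tail of the recursion.
def pvLastFilter : List Int → List Int
  | [] => []
  | e :: rest => if e ∈ rest then pvLastFilter rest else e :: pvLastFilter rest

def transformar_output_alt (ruta_dict : List Int) : List Int :=
  let flat := ruta_dict.flatMap (fun x => (PySem.Dict.get? pvEquiv (x + 1)).getD [])
  pvLastFilter flat

-- ===== PRECONDITION & SPEC =====
-- Pre_ excludes exactly the inputs on which A raises KeyError: any x with x+1 outside the keys 1..12.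
def Pre_transformar_output (ruta_dict : List Int) : Prop :=
  ∀ x ∈ ruta_dict, 0 ≤ x ∧ x ≤ 11
instance (ruta_dict : List Int) : Decidable (Pre_transformar_output ruta_dict) := by
  unfold Pre_transformar_output; infer_instance

def pvWitness_transformar_output : List Int := [11, 0, 2, 7, 11]

def Spec_transformar_output (ruta_dict : List Int) (out : List Int) : Prop :=
  out = transformar_output_alt ruta_dict
instance (ruta_dict : List Int) (out : List Int) : Decidable (Spec_transformar_output ruta_dict out) := by
  unfold Spec_transformar_output; infer_instance

-- ===== CLAIM (what is proved, stated in full; the proofs are below) =====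
def Claim_equal_transformar_output : Prop :=
  ∀ (ruta_dict : List Int), Dom_transformar_output ruta_dict →
    Pre_transformar_output ruta_dict →
    Spec_transformar_output ruta_dict (transformar_output ruta_dict)

-- ===== LEMMAS AND PROOFS =====

-- A's step is "erase (first occurrence, if any) then append".
theorem pvStepA_eq (acc : List Int) (e : Int) : pvStepA acc e = acc.erase e ++ [e] := by
  unfold pvStepA
  by_cases h : e ∈ acc
  · rw [if_pos h, PySem.List.remove?_eq_some_erase acc e h, Option.getD_some]
  · rw [if_neg h, List.erase_of_not_mem h]

theorem mem_pvLastFilter (xs : List Int) (a : Int) (h : a ∈ pvLastFilter xs) : a ∈ xs := by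
  induction xs with
  | nil => simpa [pvLastFilter] using h
  | cons x xs ih =>
    simp only [pvLastFilter] at h
    by_cases hx : x ∈ xs
    · rw [if_pos hx] at h; exact List.mem_cons_of_mem x (ih h)
    · rw [if_neg hx] at h
      rcases List.mem_cons.mp h with h | h
      · exact h ▸ List.mem_cons_self
      · exact List.mem_cons_of_mem x (ih h)

-- appending one element erases its earlier kept occurrence and puts it at the end
theorem pvLastFilter_append_singleton (xs : List Int) (e : Int) :
    pvLastFilter (xs ++ [e]) = (pvLastFilter xs).erase e ++ [e] := by
  induction xs with
  | nil => simp [pvLastFilter]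
  | cons x xs ih =>
    simp only [List.cons_append, pvLastFilter]
    by_cases hx : x ∈ xs
    · rw [if_pos (by simp [hx]), if_pos hx, ih]
    · by_cases hxe : x = e
      · subst hxe
        rw [if_pos (by simp), if_neg hx, ih, List.erase_cons_head,
          List.erase_of_not_mem (fun hc => hx (mem_pvLastFilter xs x hc))]
      · rw [if_neg (by simp [hx, hxe]), if_neg hx, ih,
          List.erase_cons_tail (by simp only [beq_iff_eq]; exact hxe), List.cons_append]

-- A's left-to-right move-to-end fold equals B's no-later-occurrence filter.
theorem foldA_eq_pvLastFilter (xs : List Int) :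
    xs.foldl pvStepA [] = pvLastFilter xs := by
  induction xs using List.reverseRecOn with
  | nil => rfl
  | append_singleton xs e ih =>
    rw [List.foldl_append, List.foldl_cons, List.foldl_nil, pvStepA_eq, ih,
      pvLastFilter_append_singleton]

-- ===== VERDICT (by name: the statement is the Claim_ definition above) =====
theorem transformar_output_spec : Claim_equal_transformar_output := by
  intro ruta_dict _ _
  unfold Spec_transformar_output transformar_output transformar_output_alt
  dsimp only
  rw [List.flatMap_def, List.foldl_flatten.symm, foldA_eq_pvLastFilter, List.map_map]
  rfl
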